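-- pv_equiv track=rewrite | github.com/mike1simon300/Baby-AI-S2-S1-VLA | VLA2Systems/utils.py | parse_mission
-- ===== SOURCE A (Python) =====
-- def parse_mission(mission):
--     """Extracts task details from the environment mission description."""
--     mission = mission.lower()
--     words = mission.split()
--
--     task_type = None
--     obj1, color1 = None, None
--     obj2, color2 = None, None
--
--     if "pick up" in mission:
--         task_type = "pick_up"
--     elif "go to" in mission or "get to" in mission:
--         task_type = "go_to"
--     elif "open" in mission and "door" in mission:
--         task_type = "open_door"
--     elif "put" in mission and "next to" in mission:
--         task_type = "put_next_to"
--
--     colors = {"red", "green", "blue", "purple", "yellow", "grey"}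
--     objects = {"ball", "box", "door", "key", "goal"}
--     color1, obj1, color2, obj2 = "", "", "", ""
--     for i, word in enumerate(words):
--         if word in colors:
--             if obj1 == "":
--                 color1 = word
--             else:
--                 color2 = word
--         elif word in objects:
--             if obj1 == "":
--                 obj1 = word
--             else:
--                 obj2 = word
--
--     return task_type, color1, obj1, color2, obj2
-- ===== SOURCE B (Python) =====
-- def parse_mission(mission):
--     """Extracts task details from the environment mission description."""
--     mission = mission.lower()
--     words = mission.split()
--
--     task_type = None
--     if "pick up" in mission:
--         task_type = "pick_up"
--     elif "go to" in mission or "get to" in mission: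
--         task_type = "go_to"
--     elif "open" in mission and "door" in mission:
--         task_type = "open_door"
--     elif "put" in mission and "next to" in mission:
--         task_type = "put_next_to"
--
--     colors = {"red", "green", "blue", "purple", "yellow", "grey"}
--     objects = {"ball", "box", "door", "key", "goal"}
--
--     # index of the first object word (len(words) if none)
--     k = next((i for i, w in enumerate(words) if w in objects), len(words))
--     pre, post = words[:k], words[k + 1:]
--     color1 = ([w for w in pre if w in colors] or [''])[-1]
--     obj1 = words[k] if k < len(words) else ''
--     color2 = ([w for w in post if w in colors] or [''])[-1]
--     obj2 = ([w for w in post if w in objects] or [''])[-1]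
--
--     return task_type, color1, obj1, color2, obj2
-- ===== Notes on version B (the rewrite author's own statement) =====
-- stated objective: alternative
-- what changed: Replaces A's single stateful sweep guarded on whether obj1 is still unset by a split at the index of the first object word: color1 is the last color word before it, obj1 the word there, and color2/obj2 the last color/object word after it, each taken from filtered sublists.
import Mathlib
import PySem

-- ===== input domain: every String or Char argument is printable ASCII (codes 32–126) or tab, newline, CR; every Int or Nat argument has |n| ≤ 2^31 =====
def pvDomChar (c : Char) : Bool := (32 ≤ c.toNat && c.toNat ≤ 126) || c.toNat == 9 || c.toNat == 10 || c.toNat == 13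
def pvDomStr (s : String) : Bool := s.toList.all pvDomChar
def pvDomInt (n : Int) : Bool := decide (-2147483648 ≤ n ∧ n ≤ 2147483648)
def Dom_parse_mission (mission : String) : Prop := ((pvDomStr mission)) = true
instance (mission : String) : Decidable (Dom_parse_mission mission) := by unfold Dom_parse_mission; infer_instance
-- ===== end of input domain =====

-- B replaces A's single stateful sweep (guarded on whether obj1 is still unset) by a split at the first object word:
-- color1 = last color before it, color2/obj2 = last color/object after it. Objective: alternative decomposition.


-- shared vocabulary (the Python set literals in both programs)
def pvColors : PySem.Set String := PySem.Set.ofList ["red", "green", "blue", "purple", "yellow", "grey"]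
def pvObjects : PySem.Set String := PySem.Set.ofList ["ball", "box", "door", "key", "goal"]
def pvIsColor (w : String) : Bool := PySem.Set.contains pvColors w
def pvIsObj (w : String) : Bool := PySem.Set.contains pvObjects w

-- ===== PORT A =====
-- A's loop body (one word, state (color1, obj1, color2, obj2))
def pvStepA (st : String × String × String × String) (word : String) :
    String × String × String × String :=
  let (c1, o1, c2, o2) := st
  if pvIsColor word then
    if o1 == "" then (word, o1, c2, o2) else (c1, o1, word, o2)
  else if pvIsObj word then
    if o1 == "" then (c1, word, c2, o2) else (c1, o1, c2, word)
  else st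

def parse_mission (mission : String) : Option String × String × String × String × String :=
  let mission := PySem.Str.lower mission
  let words := PySem.Str.split₀ mission
  let task_type : Option String :=
    if PySem.Str.isIn "pick up" mission then some "pick_up"
    else if PySem.Str.isIn "go to" mission || PySem.Str.isIn "get to" mission then some "go_to"
    else if PySem.Str.isIn "open" mission && PySem.Str.isIn "door" mission then some "open_door"
    else if PySem.Str.isIn "put" mission && PySem.Str.isIn "next to" mission then some "put_next_to"
    else none
  let st := words.foldl pvStepA ("", "", "", "")
  (task_type, st.1, st.2.1, st.2.2.1, st.2.2.2)

-- ===== PORT B =====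
def parse_mission_alt (mission : String) : Option String × String × String × String × String :=
  let mission := PySem.Str.lower mission
  let words := PySem.Str.split₀ mission
  let task_type : Option String :=
    if PySem.Str.isIn "pick up" mission then some "pick_up"
    else if PySem.Str.isIn "go to" mission || PySem.Str.isIn "get to" mission then some "go_to"
    else if PySem.Str.isIn "open" mission && PySem.Str.isIn "door" mission then some "open_door"
    else if PySem.Str.isIn "put" mission && PySem.Str.isIn "next to" mission then some "put_next_to"
    else none
  let k := (words.findIdx? (pvIsObj)).getD words.length
  let pre := words.take k
  let post := words.drop (k + 1)
  let color1 := (pre.filter (pvIsColor)).getLastD ""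
  let obj1 := if k < words.length then words.getD k "" else ""
  let color2 := (post.filter (pvIsColor)).getLastD ""
  let obj2 := (post.filter (pvIsObj)).getLastD ""
  (task_type, color1, obj1, color2, obj2)

-- ===== PRECONDITION & SPEC =====
def Spec_parse_mission (mission : String) (out : Option String × String × String × String × String) : Prop := out = parse_mission_alt mission
instance (mission : String) (out : Option String × String × String × String × String) : Decidable (Spec_parse_mission mission out) := by unfold Spec_parse_mission; infer_instance

-- ===== CLAIM (what is proved, stated in full; the proofs are below) =====
def Claim_equal_parse_mission : Prop := ∀ (mission : String), Dom_parse_mission mission → Spec_parse_mission mission (parse_mission mission)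

-- ===== LEMMAS AND PROOFS =====

lemma obj_ne_empty {w : String} (h : pvIsObj w = true) : (w == "") = false := by
  have hm : w ∈ ["ball", "box", "door", "key", "goal"] := by
    simpa [pvIsObj, pvObjects, PySem.Set.contains_iff, PySem.Set.mem_ofList] using h
  fin_cases hm <;> decide

-- phase 2: once obj1 is a (nonempty) object word, the loop only overwrites color2/obj2
lemma foldA_phase2 (l : List String) (c1 o1 c2 o2 : String) (h : (o1 == "") = false) :
    l.foldl pvStepA (c1, o1, c2, o2) =
      (c1, o1,
       (l.filter (pvIsColor)).getLastD c2,
       (l.filter (pvIsObj)).getLastD o2) := by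
  induction l generalizing c2 o2 with
  | nil => simp
  | cons w ws ih =>
    simp only [List.foldl_cons]
    by_cases hc : pvIsColor w = true
    · have hno : pvIsObj w = false := by
        have hm : w ∈ ["red", "green", "blue", "purple", "yellow", "grey"] := by
          simpa [pvIsColor, pvColors, PySem.Set.contains_iff, PySem.Set.mem_ofList] using hc
        fin_cases hm <;> decide
      rw [show pvStepA (c1, o1, c2, o2) w = (c1, o1, w, o2) by simp [pvStepA, hc, h]]
      rw [ih w o2, List.filter_cons_of_pos hc, List.filter_cons_of_neg (by simp [hno]),
        List.getLastD_cons]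
    · by_cases ho : pvIsObj w = true
      · rw [show pvStepA (c1, o1, c2, o2) w = (c1, o1, c2, w) by simp [pvStepA, hc, ho, h]]
        rw [ih c2 w, List.filter_cons_of_neg (by simp [hc]), List.filter_cons_of_pos ho,
          List.getLastD_cons]
      · rw [show pvStepA (c1, o1, c2, o2) w = (c1, o1, c2, o2) by simp [pvStepA, hc, ho]]
        rw [ih c2 o2, List.filter_cons_of_neg (by simp [hc]), List.filter_cons_of_neg (by simp [ho])]

-- phase 1: before the first object word, colors overwrite color1; the split formula
lemma foldA_phase1 (l : List String) (c1 c2 o2 : String) :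
    l.foldl pvStepA (c1, "", c2, o2) =
      (let k := (l.findIdx? (pvIsObj)).getD l.length
       (((l.take k).filter (pvIsColor)).getLastD c1,
        (if k < l.length then l.getD k "" else ""),
        ((l.drop (k + 1)).filter (pvIsColor)).getLastD c2,
        ((l.drop (k + 1)).filter (pvIsObj)).getLastD o2)) := by
  induction l generalizing c1 with
  | nil => simp
  | cons w ws ih =>
    simp only [List.foldl_cons]
    by_cases ho : pvIsObj w = true
    · have hne := obj_ne_empty ho
      have hnc : pvIsColor w = false := by
        have hm : w ∈ ["ball", "box", "door", "key", "goal"] := by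
          simpa [pvIsObj, pvObjects, PySem.Set.contains_iff, PySem.Set.mem_ofList] using ho
        fin_cases hm <;> decide
      rw [show pvStepA (c1, "", c2, o2) w = (c1, w, c2, o2) by simp [pvStepA, hnc, ho]]
      rw [foldA_phase2 _ _ _ _ _ hne]
      simp [List.findIdx?_cons, ho]
    · have hk : (List.findIdx? pvIsObj (w :: ws)).getD (ws.length + 1)
          = ((ws.findIdx? pvIsObj).getD ws.length) + 1 := by
        cases h : ws.findIdx? pvIsObj <;>
          simp [List.findIdx?_cons, ho, h]
      by_cases hc : pvIsColor w = true
      · rw [show pvStepA (c1, "", c2, o2) w = (w, "", c2, o2) by simp [pvStepA, hc]]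
        rw [ih w]
        simp only [List.length_cons, hk, List.take_succ_cons, List.drop_succ_cons,
          List.getD_cons_succ, List.filter_cons_of_pos hc, List.getLastD_cons,
          Nat.add_lt_add_iff_right]
      · rw [show pvStepA (c1, "", c2, o2) w = (c1, "", c2, o2) by simp [pvStepA, hc, ho]]
        rw [ih c1]
        have hfil : List.filter pvIsColor (w :: List.take ((ws.findIdx? pvIsObj).getD ws.length) ws)
            = List.filter pvIsColor (List.take ((ws.findIdx? pvIsObj).getD ws.length) ws) := by
          simp [Bool.of_not_eq_true hc]
        simp only [List.length_cons, hk, List.take_succ_cons, List.drop_succ_cons,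
          List.getD_cons_succ, hfil, Nat.add_lt_add_iff_right]

-- ===== VERDICT (by name: the statement is the Claim_ definition above) =====
theorem parse_mission_spec : Claim_equal_parse_mission := by
  intro mission _
  unfold Spec_parse_mission parse_mission parse_mission_alt
  simp only [foldA_phase1]
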